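-- pv_equiv track=rewrite | github.com/MrHamdulay/csc3-capstone | examples/data/Assignment_4/smrjay001/piglatin.py | toEnglish
-- ===== SOURCE A (Python) =====
-- def toEnglish (s):
--
--     count = 0
--     word = s.split(" ")
--
--     # Runs through each word in list
--     for i in word:
--
--         temp = ""
--
--         if i.count("w") > 0:
--             word[count] = word[count][:len(i)-3]
--
--         else:
--             word[count] = (word[count][:len(i)-2])[::-1]
--
--             # Runs through letters in word i
--             for j in word[count]:
--                 if j == 'a': break
--
--                 else:
--                     temp += j
--
--             word[count] = ((word[count])[len(temp)+1:])[::-1]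
--
--             temp = temp[::-1]
--             word[count] = temp + (word[count])
--
--
--         temp = ""
--         count+=1
--
--
--     return " ".join(word)
-- ===== SOURCE B (Python) =====
-- def toEnglish(s):
--     out = []
--     for word in s.split(" "):
--         if "w" in word:
--             out.append(word[:len(word)-3])
--         else:
--             core = word[:len(word)-2]
--             p = core.rfind("a")
--             out.append(core if p == -1 else core[p+1:] + core[:p])
--     return " ".join(out)
-- ===== Notes on version B (the rewrite author's own statement) =====
-- stated objective: simpler
-- what changed: Per word, B replaces A's reverse-scan-reverse machinery (reverse the truncated word, accumulate letters up to the pivot vowel in an inner loop, slice, reverse twice more and concatenate) with a single reverse-find of the pivot vowel on the truncated word plus two forward slices, eliminating all string reversals and the inner letter loop.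
import Mathlib
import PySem

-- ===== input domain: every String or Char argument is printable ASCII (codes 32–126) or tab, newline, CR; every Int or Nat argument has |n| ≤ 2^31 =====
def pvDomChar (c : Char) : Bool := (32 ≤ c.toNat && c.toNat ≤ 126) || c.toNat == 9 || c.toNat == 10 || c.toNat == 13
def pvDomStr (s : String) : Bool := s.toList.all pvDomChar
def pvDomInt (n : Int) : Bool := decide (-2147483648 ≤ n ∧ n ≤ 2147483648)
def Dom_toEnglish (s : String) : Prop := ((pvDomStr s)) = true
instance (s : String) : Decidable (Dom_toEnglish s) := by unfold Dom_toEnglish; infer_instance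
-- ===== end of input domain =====

-- B replaces A's reverse-scan-reverse per-word machinery by one rfind('a') and two forward slices (objective: simpler).

-- ===== PORT A =====
-- the inner 'for j in word[count]: if j == 'a': break; else: temp += j' loop
def pvTempA : List Char → List Char
  | [] => []
  | j :: rest => if j = 'a' then [] else j :: pvTempA rest

def pvWordA (i : List Char) : List Char :=
  if PySem.Chars.count i ['w'] > 0 then
    PySem.List.slice i none (some ((i.length : Int) - 3))          -- word[:len(i)-3]
  else
    -- (word[:len(i)-2])[::-1]  ([::-1] is reverse, PySem.List.slice?_none_none_neg_one)
    let r := (PySem.List.slice i none (some ((i.length : Int) - 2))).reverse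
    let temp := pvTempA r
    -- (r[len(temp)+1:])[::-1]
    let rest := (PySem.List.slice r (some ((temp.length : Int) + 1)) none).reverse
    temp.reverse ++ rest                                           -- temp[::-1] + …

def toEnglish (s : String) : String :=
  String.ofList (PySem.Chars.join [' '] ((PySem.Chars.splitOn s.toList [' ']).map pvWordA))

-- ===== PORT B =====
def pvWordB (w : List Char) : List Char :=
  if PySem.Chars.isIn ['w'] w then
    PySem.List.slice w none (some ((w.length : Int) - 3))          -- word[:len(word)-3]
  else
    let core := PySem.List.slice w none (some ((w.length : Int) - 2))
    let p := PySem.Chars.rfind core ['a']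
    if p = -1 then core
    else PySem.List.slice core (some (p + 1)) none ++ PySem.List.slice core none (some p)

def toEnglish_alt (s : String) : String :=
  String.ofList (PySem.Chars.join [' '] ((PySem.Chars.splitOn s.toList [' ']).map pvWordB))

-- ===== PRECONDITION & SPEC =====
def Spec_toEnglish (s : String) (out : String) : Prop := out = toEnglish_alt s
instance (s : String) (out : String) : Decidable (Spec_toEnglish s out) := by unfold Spec_toEnglish; infer_instance

-- ===== CLAIM (what is proved, stated in full; the proofs are below) =====
def Claim_equal_toEnglish : Prop := ∀ (s : String), Dom_toEnglish s → Spec_toEnglish s (toEnglish s)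

-- ===== LEMMAS AND PROOFS =====

-- count.go with single-char needle counts occurrences
lemma pv_count_go_w (l : List Char) : ∀ (fuel acc : Nat), l.length ≤ fuel →
    PySem.Chars.count.go ['w'] fuel l acc = acc + l.count 'w' := by
  induction l with
  | nil => intro fuel acc _; cases fuel <;> simp [PySem.Chars.count.go]
  | cons h t ih =>
      intro fuel acc hle
      cases fuel with
      | zero => simp at hle
      | succ m =>
          simp only [PySem.Chars.count.go]
          by_cases hw : h = 'w'
          · subst hw
            simp only [List.isPrefixOf, BEq.rfl, Bool.true_and, List.isPrefixOf_nil_left, if_true]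
            rw [show (List.drop (['w'].length) ('w' :: t)) = t by simp]
            rw [ih m (acc + 1) (by simpa using hle)]
            simp [List.count_cons]; ring
          · have : (['w'].isPrefixOf (h :: t)) = false := by
              simp [List.isPrefixOf, hw]
              exact fun he => hw he.symm
            rw [this]
            simp only [Bool.false_eq_true, if_false]
            rw [ih m acc (by simpa using hle)]
            have hwh : ('w' : Char) ≠ h := fun he => hw he.symm
            simp [List.count_cons, hwh]
            exact hw

lemma pv_count_w (l : List Char) : PySem.Chars.count l ['w'] = l.count 'w' := by
  have := pv_count_go_w l l.length 0 (le_refl _)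
  simpa [PySem.Chars.count] using this

lemma pv_isIn_w (l : List Char) : PySem.Chars.isIn ['w'] l = true ↔ 'w' ∈ l := by
  rw [PySem.Chars.isIn_iff_infix]
  constructor
  · intro h; simpa using h.sublist.subset (List.mem_singleton_self 'w')
  · intro h
    obtain ⟨u, v, huv, -⟩ := List.eq_append_cons_of_mem h
    exact ⟨u, v, by simp [huv]⟩

-- the two branch conditions agree
lemma pv_cond_eq (l : List Char) : (0 < PySem.Chars.count l ['w']) ↔ PySem.Chars.isIn ['w'] l = true := by
  rw [pv_count_w, pv_isIn_w, List.count_pos_iff]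

lemma pvTempA_of_not_mem (l : List Char) (h : 'a' ∉ l) : pvTempA l = l := by
  induction l with
  | nil => rfl
  | cons x t ih =>
      have hx : x ≠ 'a' := by rintro rfl; exact h (List.mem_cons_self)
      simp [pvTempA, hx, ih (fun hm => h (List.mem_cons_of_mem _ hm))]

lemma pvTempA_append (x y : List Char) (h : 'a' ∉ x) :
    pvTempA (x ++ 'a' :: y) = x := by
  induction x with
  | nil => simp [pvTempA]
  | cons c t ih =>
      have hc : c ≠ 'a' := by rintro rfl; exact h (List.mem_cons_self)
      simp [pvTempA, hc, ih (fun hm => h (List.mem_cons_of_mem _ hm))]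

lemma pv_prefix_a (xs : List Char) : (['a'].isPrefixOf xs = true) ↔ ∃ t, xs = 'a' :: t := by
  cases xs with
  | nil => simp [List.isPrefixOf]
  | cons c t =>
      simp only [List.isPrefixOf, List.isPrefixOf_nil_left, Bool.and_true]
      constructor
      · intro h; exact ⟨t, by simpa [eq_comm] using (beq_iff_eq.mp h) ▸ rfl⟩
      · rintro ⟨t', ht⟩; cases ht; simp

lemma pv_rfind_go_none (s : List Char) (h : 'a' ∉ s) : ∀ j, PySem.Chars.rfind.go s ['a'] j = -1 := by
  intro j
  induction j with
  | zero =>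
      have : (['a'].isPrefixOf s) = false := by
        rw [Bool.eq_false_iff]; intro hp
        obtain ⟨t, ht⟩ := (pv_prefix_a s).mp hp
        exact h (ht ▸ List.mem_cons_self)
      simp [PySem.Chars.rfind.go, this]
  | succ m ih =>
      have : (['a'].isPrefixOf (List.drop (m + 1) s)) = false := by
        rw [Bool.eq_false_iff]; intro hp
        obtain ⟨t, ht⟩ := (pv_prefix_a _).mp hp
        exact h ((List.drop_subset _ _) (ht ▸ List.mem_cons_self))
      simp only [PySem.Chars.rfind.go, this, Bool.false_eq_true, if_false]
      exact ih

lemma pv_rfind_go_last (u v : List Char) (hv : 'a' ∉ v) :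
    ∀ j, u.length ≤ j → PySem.Chars.rfind.go (u ++ 'a' :: v) ['a'] j = u.length := by
  intro j
  induction j with
  | zero =>
      intro hle
      have hu : u = [] := List.eq_nil_of_length_eq_zero (Nat.le_zero.mp hle)
      subst hu
      have : (['a'].isPrefixOf ([] ++ 'a' :: v)) = true := (pv_prefix_a _).mpr ⟨v, rfl⟩
      simp [PySem.Chars.rfind.go, this]
  | succ m ih =>
      intro hle
      rcases Nat.lt_or_ge m u.length with hm | hm
      · -- u.length = m + 1: the prefix test at m+1 succeeds
        have hem : u.length = m + 1 := le_antisymm hle hm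
        have hdrop : List.drop (m + 1) (u ++ 'a' :: v) = 'a' :: v := by
          rw [← hem, List.drop_left]
        have : (['a'].isPrefixOf (List.drop (m + 1) (u ++ 'a' :: v))) = true :=
          (pv_prefix_a _).mpr ⟨v, hdrop⟩
        simp [PySem.Chars.rfind.go, this, hem]
      · -- m + 1 > u.length: the drop lands strictly inside v, no 'a' there
        have hdrop : List.drop (m + 1) (u ++ 'a' :: v) = List.drop (m - u.length) v := by
          rw [show u ++ 'a' :: v = (u ++ ['a']) ++ v by simp,
              show m + 1 = (u ++ ['a']).length + (m - u.length) by simp; omega,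
              List.drop_append]
          simp
        have : (['a'].isPrefixOf (List.drop (m + 1) (u ++ 'a' :: v))) = false := by
          rw [Bool.eq_false_iff]; intro hp
          obtain ⟨t, ht⟩ := (pv_prefix_a _).mp hp
          exact hv ((List.drop_subset _ _) ((hdrop ▸ ht) ▸ List.mem_cons_self))
        simp only [PySem.Chars.rfind.go, this, Bool.false_eq_true, if_false]
        exact ih hm

-- the per-word algorithms agree on the truncated word
lemma pv_core_eq (core : List Char) :
    (let r := core.reverse
     let temp := pvTempA r
     temp.reverse ++ (PySem.List.slice r (some ((temp.length : Int) + 1)) none).reverse)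
    = (let p := PySem.Chars.rfind core ['a']
       if p = -1 then core
       else PySem.List.slice core (some (p + 1)) none ++ PySem.List.slice core none (some p)) := by
  by_cases ha : 'a' ∈ core
  · -- last 'a' in core = first 'a' in core.reverse
    obtain ⟨x, y, hr, hx⟩ := List.eq_append_cons_of_mem (List.mem_reverse.mpr ha)
    have hcore : core = y.reverse ++ 'a' :: x.reverse := by
      have := congrArg List.reverse hr
      simpa using this
    have hrfind : PySem.Chars.rfind core ['a'] = (y.length : Int) := by
      rw [PySem.Chars.rfind, hcore]
      rw [pv_rfind_go_last y.reverse x.reverse (by simpa using hx) _ (by simp)]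
      simp
    simp only [hrfind]
    have hne : ((y.length : Int) ≠ -1) := by omega
    rw [if_neg hne]
    -- A side
    rw [hr, pvTempA_append x y hx]
    rw [PySem.List.slice_from _ (by positivity)]
    have h1 : ((x.length : Int) + 1).toNat = x.length + 1 := by omega
    rw [h1, show x ++ 'a' :: y = (x ++ ['a']) ++ y by simp,
        show x.length + 1 = (x ++ ['a']).length by simp, List.drop_left]
    -- B side
    rw [PySem.List.slice_from _ (by positivity), PySem.List.slice_to _ (by positivity)]
    have h2 : ((y.length : Int) + 1).toNat = y.length + 1 := by omega
    have h3 : ((y.length : Int)).toNat = y.length := by omega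
    rw [h2, h3, hcore, show y.reverse ++ 'a' :: x.reverse = (y.reverse ++ ['a']) ++ x.reverse by simp]
    rw [show y.length + 1 = (y.reverse ++ ['a']).length by simp, List.drop_left]
    rw [List.take_append_of_le_length (by simp), show y.length = y.reverse.length by simp,
        List.take_left]
  · -- no 'a' anywhere: A returns core unchanged, rfind = -1
    have hrfind : PySem.Chars.rfind core ['a'] = -1 := by
      rw [PySem.Chars.rfind]
      exact pv_rfind_go_none core ha _
    simp only [hrfind, if_pos rfl]
    have hra : 'a' ∉ core.reverse := fun hm => ha (List.mem_reverse.mp hm)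
    rw [pvTempA_of_not_mem _ hra]
    rw [PySem.List.slice_from _ (by positivity)]
    have : ((core.reverse.length : Int) + 1).toNat = core.length + 1 := by simp
    rw [this, List.drop_eq_nil_of_le (by simp)]
    simp

lemma pv_word_eq (w : List Char) : pvWordA w = pvWordB w := by
  unfold pvWordA pvWordB
  by_cases hc : PySem.Chars.isIn ['w'] w = true
  · rw [if_pos ((pv_cond_eq w).mpr hc), if_pos hc]
  · rw [if_neg (fun h => hc ((pv_cond_eq w).mp h)), if_neg hc]
    exact pv_core_eq (PySem.List.slice w none (some ((w.length : Int) - 2)))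

-- ===== VERDICT (by name: the statement is the Claim_ definition above) =====
theorem toEnglish_spec : Claim_equal_toEnglish := by
  unfold Claim_equal_toEnglish
  intro s _
  unfold Spec_toEnglish toEnglish toEnglish_alt
  rw [show pvWordA = pvWordB from funext pv_word_eq]
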